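-- pv_equiv track=rewrite | github.com/AlbertoSierraLopez/DisenoAnalisisAlgoritmos | Examenes Años Anteriores/2018-2019 Mayo Vicálvaro/Grafo Coloreado.py | Valido
-- ===== SOURCE A (Python) =====
-- def Valido(G, n, nodo, color, parcial):
--     if n < 0:
--         return True
--     else:
--         if G[n, nodo]:
--             if parcial[n] == color:
--                 return False
--         return Valido(G, n - 1, nodo, color, parcial)
-- ===== SOURCE B (Python) =====
-- def Valido(G, n, nodo, color, parcial):
--     return not any(G[i, nodo] and parcial[i] == color for i in range(n, -1, -1))
-- ===== Notes on version B (the rewrite author's own statement) =====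
-- stated objective: idiomatic
-- what changed: Replaced the tail recursion counting n down to -1 by a single `not any(...)` over a descending range generator, which checks the same indices in the same order with the same short-circuit.
import Mathlib
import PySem

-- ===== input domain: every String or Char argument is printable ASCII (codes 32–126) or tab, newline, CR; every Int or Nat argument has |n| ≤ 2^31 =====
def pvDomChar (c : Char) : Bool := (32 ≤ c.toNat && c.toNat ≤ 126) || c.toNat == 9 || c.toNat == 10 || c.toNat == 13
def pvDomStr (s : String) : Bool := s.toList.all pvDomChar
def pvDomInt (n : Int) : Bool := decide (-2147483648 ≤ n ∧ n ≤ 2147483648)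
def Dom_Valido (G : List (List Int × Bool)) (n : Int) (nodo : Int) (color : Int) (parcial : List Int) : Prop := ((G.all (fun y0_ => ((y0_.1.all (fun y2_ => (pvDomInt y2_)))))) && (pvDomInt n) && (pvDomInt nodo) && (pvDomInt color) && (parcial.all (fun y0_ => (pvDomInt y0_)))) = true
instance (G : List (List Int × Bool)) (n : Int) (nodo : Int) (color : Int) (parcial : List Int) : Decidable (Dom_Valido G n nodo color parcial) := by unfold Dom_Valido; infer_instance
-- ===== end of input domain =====

-- B replaces A's countdown tail recursion by a single `not any(...)` over the same descending range
-- (same order, same short-circuit); idiomatic decomposition, return value only.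

-- ===== PORT A =====
def Valido (G : List (List Int × Bool)) (n : Int) (nodo : Int) (color : Int) (parcial : List Int) : Bool :=
  if n < 0 then true
  else
    if ((PySem.Dict.mk G).get? [n, nodo]).getD false then  -- G[n, nodo]; Pre_ excludes the KeyError (none) case
      if ((PySem.List.pyGet? parcial n).getD 0 == color) then false  -- parcial[n]; Pre_ excludes the IndexError case
      else Valido G (n - 1) nodo color parcial
    else Valido G (n - 1) nodo color parcial
termination_by (n + 1).toNat
decreasing_by all_goals omega

-- ===== PORT B =====
-- the per-index test `G[i, nodo] and parcial[i] == color` of B's generator (same defaults as in port A)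
def conflB (G : List (List Int × Bool)) (nodo : Int) (color : Int) (parcial : List Int) (i : Int) : Bool :=
  ((PySem.Dict.mk G).get? [i, nodo]).getD false && ((PySem.List.pyGet? parcial i).getD 0 == color)

def Valido_alt (G : List (List Int × Bool)) (n : Int) (nodo : Int) (color : Int) (parcial : List Int) : Bool :=
  !((PySem.List.pyRange n (-1) (-1)).any (conflB G nodo color parcial))

-- ===== PRECONDITION & SPEC =====
-- okIdx i: evaluating index i does not raise (the key (i, nodo) exists; if its value is truthy, parcial[i] is in range)
def okIdx (G : List (List Int × Bool)) (nodo : Int) (parcial : List Int) (i : Int) : Bool :=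
  match (PySem.Dict.mk G).get? [i, nodo] with
  | none => false
  | some b => !b || decide (0 ≤ i ∧ i < (parcial.length : Int))

-- conflE i: index i is a genuine conflict (key present and true, parcial[i] in range and equal to color)
def conflE (G : List (List Int × Bool)) (nodo : Int) (color : Int) (parcial : List Int) (i : Int) : Bool :=
  ((PySem.Dict.mk G).get? [i, nodo] == some true) && (PySem.List.pyGet? parcial i == some color)

-- candIdx: the first component of a length-2 key (i, nodo) of G — the indices whose lookup can succeed
def candIdx (nodo : Int) (e : List Int × Bool) : Option Int :=
  match e.1 with
  | [k, j] => if j = nodo then some k else none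
  | _ => none

-- Pre_ excludes exactly the inputs on which both Pythons raise (KeyError on a missing key (i, nodo) or
-- IndexError on parcial[i], hit while scanning i = n, n-1, …): with m the largest genuine conflict index
-- in [0, n] (lo = m+1, or 0 if none), every index in [lo, n] must evaluate without raising; the size
-- guard n+1-lo <= |G| is implied by that (each such index needs its own key) and only keeps the check cheap.
def Pre_Valido (G : List (List Int × Bool)) (n : Int) (nodo : Int) (color : Int) (parcial : List Int) : Prop :=
  (let cs := (G.filterMap (candIdx nodo)).filter
      (fun k => decide (0 ≤ k) && decide (k ≤ n) && conflE G nodo color parcial k)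
   let lo : Int := match cs.max? with | some m => m + 1 | none => 0
   if n + 1 - lo ≤ (G.length : Int) then
     (PySem.List.pyRange lo (n + 1) 1).all (okIdx G nodo parcial)
   else false) = true

instance (G : List (List Int × Bool)) (n : Int) (nodo : Int) (color : Int) (parcial : List Int) : Decidable (Pre_Valido G n nodo color parcial) := by unfold Pre_Valido; infer_instance

def pvWitness_Valido : (List (List Int × Bool)) × Int × Int × Int × List Int :=
  ([([0, 0], true)], 0, 0, 1, [2])

def Spec_Valido (G : List (List Int × Bool)) (n : Int) (nodo : Int) (color : Int) (parcial : List Int) (out : Bool) : Prop := out = Valido_alt G n nodo color parcial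
instance (G : List (List Int × Bool)) (n : Int) (nodo : Int) (color : Int) (parcial : List Int) (out : Bool) : Decidable (Spec_Valido G n nodo color parcial out) := by unfold Spec_Valido; infer_instance

-- ===== CLAIM =====
def Claim_equal_Valido : Prop := ∀ (G : List (List Int × Bool)) (n : Int) (nodo : Int) (color : Int) (parcial : List Int), Dom_Valido G n nodo color parcial → Pre_Valido G n nodo color parcial → Spec_Valido G n nodo color parcial (Valido G n nodo color parcial)

-- ===== LEMMAS AND PROOFS =====
-- The two ports agree on every input (Pre_ only delimits where the ports model the Pythons):
-- A's countdown recursion equals `not any` over the descending range, by induction on (n+1).toNat.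
lemma valido_eq_not_any (G : List (List Int × Bool)) (nodo : Int) (color : Int) (parcial : List Int) :
    ∀ (k : Nat) (n : Int), (n + 1).toNat ≤ k →
      Valido G n nodo color parcial =
        !((PySem.List.pyRange n (-1) (-1)).any (conflB G nodo color parcial)) := by
  intro k
  induction k with
  | zero =>
    intro n hk
    have hn : n < 0 := by omega
    rw [Valido, PySem.List.pyRange_neg_one_eq_nil (by omega : n ≤ -1)]
    simp [hn]
  | succ k ih =>
    intro n hk
    by_cases hn : n < 0
    · rw [Valido, PySem.List.pyRange_neg_one_eq_nil (by omega : n ≤ -1)]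
      simp [hn]
    · rw [Valido, PySem.List.pyRange_neg_one_cons (by omega : (-1:Int) < n)]
      have hrec := ih (n - 1) (by omega)
      simp only [hn, if_false, List.any_cons, conflB, Bool.not_or]
      split <;> (cases hc : (PySem.List.pyGet? parcial n).getD 0 == color <;> simp_all)

theorem Valido_spec : Claim_equal_Valido := by
  intro G n nodo color parcial _ _
  unfold Spec_Valido Valido_alt
  exact valido_eq_not_any G nodo color parcial (n + 1).toNat n le_rfl
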